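-- pv_equiv track=rewrite | github.com/haddocking/pdb-tools | pdbtools/pdb_selaltloc.py | all_same_residue
-- ===== SOURCE A (Python) =====
-- def all_same_residue(altloc_lines):
--     """Assert all lines are from same residue."""
--     residues = set()
--     for key, val in altloc_lines.items():
--         for line in val:
--             resname = line[17:20]
--             resnum = line[22:26].strip()
--             residues.add((resname, resnum))
--
--     return len(residues) == 1
-- ===== SOURCE B (Python) =====
-- def all_same_residue(altloc_lines):
--     """Assert all lines are from same residue."""
--     first = None
--     for val in altloc_lines.values():
--         for line in val:
--             key = (line[17:20], line[22:26].strip())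
--             if first is None:
--                 first = key
--             elif key != first:
--                 return False
--     return first is not None
-- ===== Notes on version B (the rewrite author's own statement) =====
-- stated objective: alternative
-- what changed: B replaces A's accumulation of a set of (resname, resnum) keys with a single sentinel 'first' key and an immediate early return False on the first mismatching key; it trades set bookkeeping for a scalar comparison with short-circuit exit.
import Mathlib
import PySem

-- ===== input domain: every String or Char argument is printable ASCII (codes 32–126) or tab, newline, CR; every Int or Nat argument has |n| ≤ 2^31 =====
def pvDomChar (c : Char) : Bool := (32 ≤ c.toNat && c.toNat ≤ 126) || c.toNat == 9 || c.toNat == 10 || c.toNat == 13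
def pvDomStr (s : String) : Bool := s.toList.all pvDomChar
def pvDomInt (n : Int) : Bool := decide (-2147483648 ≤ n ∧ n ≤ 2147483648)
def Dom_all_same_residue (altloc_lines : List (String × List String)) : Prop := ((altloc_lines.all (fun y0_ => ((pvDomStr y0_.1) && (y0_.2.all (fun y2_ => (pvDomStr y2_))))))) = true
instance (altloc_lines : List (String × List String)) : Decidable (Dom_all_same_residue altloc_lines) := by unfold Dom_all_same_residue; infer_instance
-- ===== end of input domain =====

-- B keeps a single sentinel key with an early exit instead of A's set accumulation; same result, no set bookkeeping.

-- ===== PORT A =====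
def all_same_residue (altloc_lines : List (String × List String)) : Bool :=
  let residues : PySem.Set (String × String) :=
    altloc_lines.foldl
      (fun residues kv =>
        kv.2.foldl
          (fun residues line =>
            let resname := PySem.Str.slice line (some 17) (some 20)
            let resnum := PySem.Str.strip (PySem.Str.slice line (some 22) (some 26))
            PySem.Set.add residues (resname, resnum))
          residues)
      PySem.Set.empty
  PySem.Set.len residues == 1

-- ===== PORT B =====
-- B's key helper: key = (line[17:20], line[22:26].strip())
def pvKey (line : String) : String × String :=
  (PySem.Str.slice line (some 17) (some 20), PySem.Str.strip (PySem.Str.slice line (some 22) (some 26)))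

-- inner loop of B: 'none' result = early 'return False'; 'some f?' = current sentinel
def pvGoLines (first? : Option (String × String)) : List String → Option (Option (String × String))
  | [] => some first?
  | line :: rest =>
    match first? with
    | none => pvGoLines (some (pvKey line)) rest
    | some f => if pvKey line == f then pvGoLines (some f) rest else none

-- outer loop of B over altloc_lines.values()
def pvGo (first? : Option (String × String)) : List (String × List String) → Option (Option (String × String))
  | [] => some first?
  | kv :: rest =>
    match pvGoLines first? kv.2 with
    | none => none
    | some f? => pvGo f? rest

def all_same_residue_alt (altloc_lines : List (String × List String)) : Bool :=
  match pvGo none altloc_lines with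
  | none => false
  | some f? => f?.isSome

-- ===== PRECONDITION & SPEC =====
def Spec_all_same_residue (altloc_lines : List (String × List String)) (out : Bool) : Prop := out = all_same_residue_alt altloc_lines
instance (altloc_lines : List (String × List String)) (out : Bool) : Decidable (Spec_all_same_residue altloc_lines out) := by unfold Spec_all_same_residue; infer_instance

-- ===== CLAIM (what is proved, stated in full; the proofs are below) =====
def Claim_equal_all_same_residue : Prop := ∀ (altloc_lines : List (String × List String)), Dom_all_same_residue altloc_lines → Spec_all_same_residue altloc_lines (all_same_residue altloc_lines)

-- ===== LEMMAS AND PROOFS =====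

-- the flattened list of residue keys both programs examine
def pvKeys (altloc_lines : List (String × List String)) : List (String × String) :=
  altloc_lines.flatMap (fun kv => kv.2.map pvKey)

-- the common reference predicate: nonempty and all keys equal the first
def pvAllEq : List (String × String) → Bool
  | [] => false
  | k :: rest => rest.all (· == k)

-- B's fold over the flat key list
def pvGoKeys (first? : Option (String × String)) : List (String × String) → Option (Option (String × String))
  | [] => some first?
  | k :: rest =>
    match first? with
    | none => pvGoKeys (some k) rest
    | some f => if k == f then pvGoKeys (some f) rest else none

theorem pvGoLines_eq (f? : Option (String × String)) (ls : List String) :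
    pvGoLines f? ls = pvGoKeys f? (ls.map pvKey) := by
  induction ls generalizing f? with
  | nil => rfl
  | cons l rest ih =>
    cases f? with
    | none => simpa [pvGoLines, pvGoKeys] using ih _
    | some f =>
      simp only [pvGoLines, List.map, pvGoKeys]
      split_ifs <;> simp [ih]

theorem pvGoKeys_append (f? : Option (String × String)) (a b : List (String × String)) :
    pvGoKeys f? (a ++ b) = match pvGoKeys f? a with
      | none => none
      | some g? => pvGoKeys g? b := by
  induction a generalizing f? with
  | nil => rfl
  | cons k rest ih =>
    cases f? with
    | none => simpa [pvGoKeys] using ih _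
    | some f =>
      simp only [List.cons_append, pvGoKeys]
      split_ifs <;> simp [ih]

theorem pvGo_eq (f? : Option (String × String)) (xs : List (String × List String)) :
    pvGo f? xs = pvGoKeys f? (pvKeys xs) := by
  induction xs generalizing f? with
  | nil => rfl
  | cons kv rest ih =>
    simp only [pvGo, pvKeys, List.flatMap_cons, pvGoKeys_append, pvGoLines_eq]
    cases pvGoKeys f? (kv.2.map pvKey) with
    | none => rfl
    | some g? => simpa [pvKeys] using ih g?

theorem pvGoKeys_some (f : String × String) (ks : List (String × String)) :
    pvGoKeys (some f) ks = if ks.all (· == f) then some (some f) else none := by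
  induction ks with
  | nil => rfl
  | cons k rest ih =>
    simp only [pvGoKeys, List.all_cons]
    by_cases h : k == f
    · simp only [h, Bool.true_and, ih, if_true]
    · simp [h]

theorem alt_eq_pvAllEq (xs : List (String × List String)) :
    all_same_residue_alt xs = pvAllEq (pvKeys xs) := by
  unfold all_same_residue_alt
  rw [pvGo_eq]
  cases hks : pvKeys xs with
  | nil => rfl
  | cons k rest =>
    simp only [pvGoKeys, pvGoKeys_some, pvAllEq]
    cases h : rest.all (· == k) with
    | false => simp
    | true => simp

-- A-side: fold over the flattened key list
theorem foldA_eq (xs : List (String × List String)) (s : PySem.Set (String × String)) :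
    xs.foldl
      (fun residues kv => kv.2.foldl (fun residues line => PySem.Set.add residues (pvKey line)) residues) s
    = (pvKeys xs).foldl PySem.Set.add s := by
  induction xs generalizing s with
  | nil => rfl
  | cons kv rest ih =>
    simp only [List.foldl_cons, pvKeys, List.flatMap_cons, List.foldl_append, List.foldl_map]
    simpa [pvKeys] using ih _

theorem foldl_add_length_le (ks : List (String × String)) (s : PySem.Set (String × String)) :
    s.length ≤ (ks.foldl PySem.Set.add s).length := by
  induction ks generalizing s with
  | nil => simp
  | cons k rest ih =>
    refine le_trans ?_ (ih (PySem.Set.add s k))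
    by_cases h : k ∈ s
    · rw [PySem.Set.add_of_mem h]
    · rw [PySem.Set.add_of_not_mem h]; simp

theorem foldl_add_length_eq_iff (ks : List (String × String)) (s : PySem.Set (String × String)) :
    (ks.foldl PySem.Set.add s).length = s.length ↔ ∀ x ∈ ks, x ∈ s := by
  induction ks generalizing s with
  | nil => simp
  | cons k rest ih =>
    simp only [List.foldl_cons, List.mem_cons]
    by_cases h : k ∈ s
    · rw [PySem.Set.add_of_mem h, ih]
      constructor
      · intro hall; exact fun x hx => hx.elim (fun e => e ▸ h) (hall x)
      · intro hall x hx; exact hall x (Or.inr hx)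
    · rw [PySem.Set.add_of_not_mem h]
      constructor
      · intro hlen
        exfalso
        have := foldl_add_length_le rest (s ++ [k])
        simp only [List.length_append, List.length_singleton] at this
        omega
      · intro hall; exact absurd (hall k (Or.inl rfl)) h

theorem a_eq_pvAllEq (xs : List (String × List String)) :
    all_same_residue xs = pvAllEq (pvKeys xs) := by
  unfold all_same_residue
  rw [show (fun (residues : PySem.Set (String × String)) (kv : String × List String) =>
        kv.2.foldl (fun residues line =>
          let resname := PySem.Str.slice line (some 17) (some 20)
          let resnum := PySem.Str.strip (PySem.Str.slice line (some 22) (some 26))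
          PySem.Set.add residues (resname, resnum)) residues)
      = (fun (residues : PySem.Set (String × String)) (kv : String × List String) =>
        kv.2.foldl (fun residues line => PySem.Set.add residues (pvKey line)) residues) from rfl]
  rw [foldA_eq]
  cases hks : pvKeys xs with
  | nil => rfl
  | cons k rest =>
    simp only [List.foldl_cons, pvAllEq]
    have hbase : PySem.Set.add (PySem.Set.empty : PySem.Set (String × String)) k = [k] := rfl
    rw [hbase]
    have hiff := foldl_add_length_eq_iff rest [k]
    simp only [List.length_singleton] at hiff
    by_cases hall : ∀ x ∈ rest, x ∈ ([k] : List (String × String))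
    · have hlen : (rest.foldl PySem.Set.add [k]).length = 1 := hiff.mpr hall
      have hall' : rest.all (· == k) = true := by
        simp only [List.all_eq_true]
        intro x hx
        exact (beq_iff_eq ..).mpr (by simpa using hall x hx)
      simp [PySem.Set.len, hlen, hall']
    · have hlen : (rest.foldl PySem.Set.add [k]).length ≠ 1 := fun h => hall (hiff.mp h)
      have hl : ((rest.foldl PySem.Set.add [k]).length : Int) ≠ 1 := by
        exact_mod_cast hlen
      have h2 : ¬ rest.all (· == k) = true := by
        simp only [List.all_eq_true]
        intro hc
        exact hall fun x hx => by simpa using (beq_iff_eq ..).mp (hc x hx)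
      rw [Bool.eq_iff_iff]
      simp [PySem.Set.len, hl, h2]

-- ===== VERDICT (by name: the statement is the Claim_ definition above) =====
theorem all_same_residue_spec : Claim_equal_all_same_residue := by
  intro xs _
  unfold Spec_all_same_residue
  rw [a_eq_pvAllEq, alt_eq_pvAllEq]
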